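-- pv_equiv track=rewrite | github.com/hn99515/algorithm_gs | Hajinwoo/매일한문제/22-10/1027/today.py | solution
-- ===== SOURCE A (Python) =====
-- def solution(arr):
--     N = len(arr)
--     key = [0]*N
--     i = 1
--     while True:
--         M_num = max(arr)
--         if max(arr) == 0:
--             break
--         key[arr.index(M_num)] = i
--         i += 1
--         arr[arr.index(M_num)] = 0
--         continue
--
--     return key
-- ===== SOURCE B (Python) =====
-- def solution(arr):
--     # Closed-form ranking: each positive element's rank is 1 + the number of
--     # elements strictly greater than it (or equal and earlier); non-positive
--     # elements get 0.  (Does not mutate arr, unlike A.)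
--     return [
--         0 if v <= 0 else
--         1 + sum(1 for j, w in enumerate(arr) if w > v or (w == v and j < i))
--         for i, v in enumerate(arr)
--     ]
-- ===== Notes on version B (the rewrite author's own statement) =====
-- stated objective: simpler
-- what changed: Replaces A's destructive selection loop (repeatedly take max, record rank, zero it out) by a closed-form per-element rank: a positive element's rank is 1 + the number of elements greater than it (or equal and earlier); non-positive elements get 0.
-- intended difference: On nonempty all-negative arrays A assigns rank 1 to the first maximum (a leak of its zero-sentinel stopping trick) and 0 elsewhere; B assigns 0 to every non-positive element, the intended 'rank down to zero' behaviour. — e.g. on solution([-3]): A returns [1], B returns [0]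
import Mathlib
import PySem

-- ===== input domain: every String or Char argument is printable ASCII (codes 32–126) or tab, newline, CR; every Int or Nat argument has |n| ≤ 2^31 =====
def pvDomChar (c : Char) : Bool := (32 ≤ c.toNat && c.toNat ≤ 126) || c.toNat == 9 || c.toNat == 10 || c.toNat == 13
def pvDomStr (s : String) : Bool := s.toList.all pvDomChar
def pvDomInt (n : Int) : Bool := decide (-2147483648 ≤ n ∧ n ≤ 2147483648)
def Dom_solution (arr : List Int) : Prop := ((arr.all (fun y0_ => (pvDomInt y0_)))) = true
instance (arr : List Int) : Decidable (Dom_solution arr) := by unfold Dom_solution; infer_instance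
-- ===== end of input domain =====

-- B replaces A's destructive selection loop by a closed-form per-element rank count;
-- A mutates its argument in place (zeroes ranked entries) — the equivalence proved here is about the RETURN value only.

-- ===== PORT A =====

-- termination measure lemma for A's while-loop: zeroing a nonzero entry decreases the nonzero count
theorem pv_countP_set_zero_lt (l : List Int) (k : Nat) (hk : k < l.length) (h : ¬ l[k] = 0) :
    (l.set k 0).countP (fun x => decide (x ≠ 0)) < l.countP (fun x => decide (x ≠ 0)) := by
  induction l generalizing k with
  | nil => simp at hk
  | cons a t ih =>
    cases k with
    | zero =>
      simp only [List.getElem_cons_zero] at h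
      simp [h]
    | succ k =>
      simp only [List.getElem_cons_succ] at h
      simp only [List.length_cons, Nat.succ_lt_succ_iff] at hk
      simp only [List.set_cons_succ, List.countP_cons]
      have := ih k hk h
      omega

-- A's 'while True' loop: key[arr.index(max(arr))] = i; arr[arr.index(max(arr))] = 0; i += 1
-- (the 'none' branches are unreachable: Python raises ValueError on max([]) — excluded by Pre_ —
--  and the maximum is always a member, so arr.index(M) succeeds)
def loopA (arr : List Int) (key : List Int) (i : Int) : List Int :=
  match PySem.List.max? arr (fun y => y) with
  | none => key
  | some M =>
    if hz : M = 0 then key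
    else
      match hidx : PySem.List.index? arr M with
      | none => key
      | some idx => loopA (arr.set idx 0) (key.set idx i) (i + 1)
termination_by arr.countP (fun x => decide (x ≠ 0))
decreasing_by
  obtain ⟨hk, hv, -⟩ := PySem.List.getElem_of_index?_eq_some hidx
  exact pv_countP_set_zero_lt arr idx hk (by rw [hv]; exact hz)

def solution (arr : List Int) : List Int :=
  loopA arr (List.replicate arr.length 0) 1

-- ===== PORT B =====
-- Source B: [0 if v <= 0 else 1 + sum(1 for j, w in enumerate(arr) if w > v or (w == v and j < i))
--        for i, v in enumerate(arr)]
def solution_alt (arr : List Int) : List Int :=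
  (PySem.List.enumerate arr).map (fun p =>
    if p.2 ≤ 0 then 0
    else 1 + (PySem.List.enumerate arr).foldl
        (fun acc q => if p.2 < q.2 ∨ (q.2 = p.2 ∧ q.1 < p.1) then acc + 1 else acc) (0 : Int))

-- ===== PRECONDITION & SPEC =====
-- Pre_ excludes only the empty list, on which Python's max([]) raises ValueError.
def Pre_solution (arr : List Int) : Prop := arr ≠ []
instance (arr : List Int) : Decidable (Pre_solution arr) := by unfold Pre_solution; infer_instance
def pvWitness_solution : List Int := [3, 1, 2]

-- On nonempty all-negative arrays A assigns rank 1 to the first maximum (a leak of its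
-- zero-sentinel stopping trick) and 0 elsewhere; B assigns 0 to every non-positive element,
-- the intended 'rank down to zero' behaviour.
def D_solution (arr : List Int) : Prop := arr ≠ [] ∧ ∀ v ∈ arr, v < 0
instance (arr : List Int) : Decidable (D_solution arr) := by unfold D_solution; infer_instance

def Spec_solution (arr : List Int) (out : List Int) : Prop := ¬ D_solution arr → out = solution_alt arr
instance (arr : List Int) (out : List Int) : Decidable (Spec_solution arr out) := by unfold Spec_solution; infer_instance

def pvDiffWitness_solution : List Int := [-3]
def pvDiffWitnessOut_solution : (List Int) × (List Int) := ([1], [0])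

-- ===== CLAIM =====
def Claim_unchanged_solution : Prop := ∀ (arr : List Int), Dom_solution arr → Pre_solution arr → Spec_solution arr (solution arr)
def Claim_changed_solution : Prop := Dom_solution (pvDiffWitness_solution) ∧ Pre_solution (pvDiffWitness_solution) ∧ D_solution (pvDiffWitness_solution) ∧ solution (pvDiffWitness_solution) = pvDiffWitnessOut_solution.1 ∧ solution_alt (pvDiffWitness_solution) = pvDiffWitnessOut_solution.2 ∧ pvDiffWitnessOut_solution.1 ≠ pvDiffWitnessOut_solution.2
def Claim_exact_solution : Prop := ∀ (arr : List Int), Dom_solution arr → Pre_solution arr → D_solution arr → solution arr ≠ solution_alt arr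

-- ===== LEMMAS AND PROOFS =====

-- B's rank count as a countP over index range
def rnk (arr : List Int) (i : Int) (v : Int) : Int :=
  ((List.range arr.length).countP
      (fun j => decide (v < arr.getD j 0 ∨ (arr.getD j 0 = v ∧ (j : Int) < i))) : Int)

-- the loop invariant's closed form: positions already zeroed (and non-positive input) keep 'key',
-- still-positive positions get base + their strict-rank among arr
def outF (arr key : List Int) (b : Int) : List Int :=
  (List.range arr.length).map (fun j =>
    if arr.getD j 0 ≤ 0 then key.getD j 0 else b + rnk arr (j : Int) (arr.getD j 0))

theorem pv_foldl_if_count {α : Type} (l : List α) (P : α → Prop) [DecidablePred P] (a : Int) :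
    l.foldl (fun acc q => if P q then acc + 1 else acc) a = a + (l.countP (fun q => decide (P q)) : Int) := by
  induction l generalizing a with
  | nil => simp
  | cons x t ih =>
    simp only [List.foldl_cons, List.countP_cons, ih]
    by_cases h : P x <;> simp [h] <;> omega

theorem pv_enumerate_eq (arr : List Int) (s : Int) :
    PySem.List.enumerate arr s = (List.range arr.length).map (fun (j : Nat) => (s + (j : Int), arr.getD j 0)) := by
  induction arr generalizing s with
  | nil => simp [PySem.List.enumerate_nil]
  | cons a t ih =>
    simp only [PySem.List.enumerate_cons, List.length_cons, List.range_succ_eq_map,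
      List.map_cons, List.map_map, ih]
    congr 1
    · simp
    · apply List.map_congr_left
      intro j hj
      simp only [Function.comp, Nat.succ_eq_add_one, List.getD_cons_succ]
      congr 1
      push_cast
      ring

theorem alt_eq (arr : List Int) :
    solution_alt arr = (List.range arr.length).map (fun j =>
      if arr.getD j 0 ≤ 0 then 0 else 1 + rnk arr (j : Int) (arr.getD j 0)) := by
  unfold solution_alt rnk
  rw [pv_enumerate_eq arr 0, List.map_map]
  apply List.map_congr_left
  intro j hj
  simp only [Function.comp, zero_add]
  by_cases hv : arr.getD j 0 ≤ 0
  · rw [if_pos hv, if_pos hv]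
  · rw [if_neg hv, if_neg hv, pv_foldl_if_count, List.countP_map]
    have e : List.countP ((fun q => decide (arr.getD j 0 < q.2 ∨ q.2 = arr.getD j 0 ∧ q.1 < (j : Int)))
          ∘ (fun (j' : Nat) => ((j' : Int), arr.getD j' 0))) (List.range arr.length)
        = List.countP (fun (j' : Nat) => decide (arr.getD j 0 < arr.getD j' 0
            ∨ (arr.getD j' 0 = arr.getD j 0 ∧ (j' : Int) < (j : Int)))) (List.range arr.length) := by
      apply List.countP_congr
      intro j' hj'
      simp [Function.comp]
    rw [e]
    ring

theorem pv_countP_range_diff (n idx : Nat) (p q : Nat → Bool) (hidx : idx < n)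
    (hpq : ∀ j, j ≠ idx → p j = q j) (hp : p idx = true) (hq : q idx = false) :
    (List.range n).countP p = (List.range n).countP q + 1 := by
  induction n with
  | zero => omega
  | succ n ih =>
    rw [List.range_succ, List.countP_append, List.countP_append]
    by_cases hn : idx = n
    · subst hn
      have he : (List.range idx).countP p = (List.range idx).countP q := by
        apply List.countP_congr
        intro j hj
        simp only [List.mem_range] at hj
        rw [hpq j (by omega)]
      simp [he, hp, hq]
    · have := ih (by omega)
      simp only [List.countP_cons, List.countP_nil, hpq n (by omega), this]
      omega

theorem pv_map_getD_range (key : List Int) (n : Nat) (h : key.length = n) :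
    (List.range n).map (fun j => key.getD j 0) = key := by
  subst h
  apply List.ext_getElem
  · simp
  · intro k h1 h2
    simp [List.getD_eq_getElem?_getD, List.getElem?_eq_getElem h2]

theorem outF_step (arr key : List Int) (i M : Int) (idx : Nat)
    (hkl : key.length = arr.length) (hik : idx < arr.length)
    (hv : arr[idx] = M) (hMpos : 0 < M) (hmax : ∀ y ∈ arr, y ≤ M)
    (hfirst : ∀ j (hj : j < idx), arr[j] ≠ M) :
    outF arr key i = outF (arr.set idx 0) (key.set idx i) (i + 1) := by
  have gd : ∀ (l : List Int) (j : Nat) (h : j < l.length), l.getD j 0 = l[j] := by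
    intro l j h
    simp [List.getD_eq_getElem?_getD, List.getElem?_eq_getElem h]
  have gdset : ∀ (j : Nat), j ≠ idx → (arr.set idx 0).getD j 0 = arr.getD j 0 := by
    intro j hne
    by_cases hj : j < arr.length
    · rw [gd _ j (by simpa using hj), gd _ j hj, List.getElem_set, if_neg (by omega)]
    · rw [List.getD_eq_default _ _ (by simpa using hj), List.getD_eq_default _ _ (by omega)]
  apply List.ext_getElem (by simp [outF])
  intro k h1 h2
  have hk : k < arr.length := by simpa [outF] using h1
  simp only [outF, List.getElem_map, List.getElem_range]
  by_cases hke : k = idx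
  · subst hke
    rw [gd arr k hk, hv]
    have hset0 : (arr.set k 0).getD k 0 = 0 := by
      rw [gd _ k (by simpa using hk), List.getElem_set, if_pos rfl]
    rw [hset0, if_neg (by omega), if_pos le_rfl]
    have hkey : (key.set k i).getD k 0 = i := by
      rw [gd _ k (by simp; omega), List.getElem_set, if_pos rfl]
    rw [hkey]
    have hrnk : rnk arr (k : Int) M = 0 := by
      unfold rnk
      have : (List.range arr.length).countP
          (fun j => decide (M < arr.getD j 0 ∨ (arr.getD j 0 = M ∧ (j : Int) < (k : Int)))) = 0 := by
        apply List.countP_eq_zero.mpr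
        intro j hj
        simp only [List.mem_range] at hj
        simp only [decide_eq_true_eq, not_or]
        constructor
        · rw [gd arr j hj]
          have := hmax arr[j] (List.getElem_mem hj)
          omega
        · rintro ⟨he, hlt⟩
          rw [gd arr j hj] at he
          exact hfirst j (by exact_mod_cast hlt) he
      rw [this]
      simp
    rw [hrnk]
    ring
  · have harr' : (arr.set idx 0).getD k 0 = arr.getD k 0 := gdset k hke
    have hkey' : (key.set idx i).getD k 0 = key.getD k 0 := by
      rw [gd _ k (by simp; omega), gd _ k (by omega), List.getElem_set, if_neg (by omega)]
    rw [harr', hkey']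
    by_cases hvk : arr.getD k 0 ≤ 0
    · rw [if_pos hvk, if_pos hvk]
    · rw [if_neg hvk, if_neg hvk]
      have hdiff : (List.range arr.length).countP
            (fun j => decide (arr.getD k 0 < arr.getD j 0 ∨ (arr.getD j 0 = arr.getD k 0 ∧ (j : Int) < (k : Int))))
          = (List.range (arr.set idx 0).length).countP
            (fun j => decide (arr.getD k 0 < (arr.set idx 0).getD j 0
              ∨ ((arr.set idx 0).getD j 0 = arr.getD k 0 ∧ (j : Int) < (k : Int)))) + 1 := by
        rw [List.length_set]
        apply pv_countP_range_diff arr.length idx _ _ hik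
        · intro j hj
          rw [gdset j hj]
        · have hvM : arr.getD k 0 ≤ M := by
            rw [gd arr k hk]
            exact hmax _ (List.getElem_mem hk)
          rw [gd arr idx hik, hv]
          simp only [decide_eq_true_eq]
          rcases lt_or_eq_of_le hvM with h | h
          · exact Or.inl h
          · refine Or.inr ⟨h.symm, ?_⟩
            have : idx < k := by
              rcases Nat.lt_or_ge k idx with hlt | hge
              · exact absurd (by rw [← gd arr k hk]; exact h) (hfirst k hlt)
              · omega
            exact_mod_cast this
        · have hset0 : (arr.set idx 0).getD idx 0 = 0 := by
            rw [gd _ idx (by simpa using hik), List.getElem_set, if_pos rfl]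
          rw [hset0]
          simp only [decide_eq_false_iff_not, not_or]
          constructor
          · omega
          · rintro ⟨he, -⟩
            omega
      unfold rnk
      rw [hdiff]
      push_cast
      ring

theorem loopA_eq_zero (arr key : List Int) (i : Int)
    (h : PySem.List.max? arr (fun y => y) = some 0) : loopA arr key i = key := by
  rw [loopA]
  split
  · rfl
  · next M' heq =>
    rw [h] at heq
    injection heq with he
    rw [dif_pos he.symm]

theorem loopA_eq_step (arr key : List Int) (i M : Int) (idx : Nat)
    (hM : PySem.List.max? arr (fun y => y) = some M) (hz : M ≠ 0)
    (hidx : PySem.List.index? arr M = some idx) :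
    loopA arr key i = loopA (arr.set idx 0) (key.set idx i) (i + 1) := by
  rw [loopA]
  split
  · next heq =>
    rw [hM] at heq
    cases heq
  · next M' heq =>
    rw [hM] at heq
    injection heq with he
    subst he
    rw [dif_neg hz]
    split
    · next heq2 =>
      rw [hidx] at heq2
      cases heq2
    · next idx' heq2 =>
      rw [hidx] at heq2
      injection heq2 with he2
      subst he2
      rfl

theorem loopA_eq (arr key : List Int) (i : Int) :
    key.length = arr.length → (∃ v ∈ arr, 0 ≤ v) → loopA arr key i = outF arr key i := by
  induction arr, key, i using loopA.induct with
  | case1 arr key i hM =>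
    intro hlen hex
    obtain ⟨v, hv, -⟩ := hex
    rw [PySem.List.max?_eq_none_iff] at hM
    subst hM
    simp at hv
  | case2 arr key i hM =>
    intro hlen hex
    rw [loopA_eq_zero arr key i hM]
    have hall : ∀ j ∈ List.range arr.length,
        (if arr.getD j 0 ≤ 0 then key.getD j 0 else i + rnk arr (j : Int) (arr.getD j 0)) = key.getD j 0 := by
      intro j hj
      simp only [List.mem_range] at hj
      have hm : arr.getD j 0 ∈ arr := by
        rw [List.getD_eq_getElem?_getD, List.getElem?_eq_getElem hj]
        exact List.getElem_mem hj
      exact if_pos (PySem.List.max?_isMax hM _ hm)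
    rw [outF, List.map_congr_left hall, pv_map_getD_range key arr.length hlen]
  | case3 arr key i M hM hz hidx =>
    intro hlen hex
    exact absurd (PySem.List.max?_mem hM) ((PySem.List.index?_eq_none_iff arr M).mp hidx)
  | case4 arr key i M hM hz idx hidx ih =>
    intro hlen hex
    obtain ⟨hik, hv, hfirst⟩ := PySem.List.getElem_of_index?_eq_some hidx
    have hmax : ∀ y ∈ arr, y ≤ M := PySem.List.max?_isMax hM
    have hMpos : 0 < M := by
      obtain ⟨v, hvm, hv0⟩ := hex
      have := hmax v hvm
      omega
    have hmem0 : (0 : Int) ∈ arr.set idx 0 := by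
      have h0 : (arr.set idx 0)[idx]'(by simpa using hik) = 0 := List.getElem_set_self _
      have hm := List.getElem_mem (l := arr.set idx 0) (by simpa using hik)
      rwa [h0] at hm
    rw [loopA_eq_step arr key i M idx hM hz hidx]
    rw [ih (by simp [hlen]) ⟨0, hmem0, le_refl 0⟩]
    exact (outF_step arr key i M idx hlen hik hv hMpos hmax hfirst).symm

-- ===== VERDICT =====
theorem solution_spec : Claim_unchanged_solution := by
  intro arr hdom hpre
  unfold Spec_solution
  intro hnD
  unfold D_solution at hnD
  simp only [not_and, not_forall, not_lt, exists_prop] at hnD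
  obtain ⟨v, hvm, hv0⟩ := hnD hpre
  unfold solution
  rw [loopA_eq arr _ 1 (by simp) ⟨v, hvm, by omega⟩, alt_eq, outF]
  apply List.map_congr_left
  intro j hj
  by_cases hvj : arr.getD j 0 ≤ 0
  · rw [if_pos hvj, if_pos hvj]
    simp [List.getD_eq_getElem?_getD, List.getElem?_replicate]
    split <;> rfl
  · rw [if_neg hvj, if_neg hvj]

theorem solution_changed : Claim_changed_solution := by
  unfold Claim_changed_solution pvDiffWitness_solution pvDiffWitnessOut_solution
  refine ⟨by decide, by decide, by decide, ?_, by decide, by decide⟩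
  show loopA [-3] (List.replicate 1 0) 1 = [1]
  rw [loopA_eq_step [-3] (List.replicate 1 0) 1 (-3) 0 (by decide) (by decide) (by decide)]
  rw [loopA_eq_zero _ _ _ (by decide)]
  decide

theorem solution_tight : Claim_exact_solution := by
  unfold Claim_exact_solution
  intro arr hdom hpre hD
  obtain ⟨hne, hneg⟩ := hD
  obtain ⟨M, hM⟩ : ∃ M, PySem.List.max? arr (fun y => y) = some M := by
    cases h : PySem.List.max? arr (fun y => y) with
    | none => exact absurd ((PySem.List.max?_eq_none_iff arr _).mp h) hne
    | some M => exact ⟨M, rfl⟩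
  have hMmem := PySem.List.max?_mem hM
  have hMneg : M < 0 := hneg M hMmem
  obtain ⟨idx, hidx⟩ : ∃ idx, PySem.List.index? arr M = some idx := by
    cases h : PySem.List.index? arr M with
    | none => exact absurd hMmem ((PySem.List.index?_eq_none_iff arr M).mp h)
    | some idx => exact ⟨idx, rfl⟩
  obtain ⟨hik, hv, -⟩ := PySem.List.getElem_of_index?_eq_some hidx
  have hsol : solution arr = (List.replicate arr.length 0).set idx 1 := by
    unfold solution
    rw [loopA_eq_step arr _ 1 M idx hM (by omega) hidx]
    apply loopA_eq_zero
    cases h : PySem.List.max? (arr.set idx 0) (fun y => y) with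
    | none =>
      have h2 := (PySem.List.max?_eq_none_iff _ _).mp h
      rw [List.set_eq_nil_iff] at h2
      exact absurd h2 hne
    | some m =>
      have hmem := PySem.List.max?_mem h
      have hmaxm := PySem.List.max?_isMax h
      have h0mem : (0 : Int) ∈ arr.set idx 0 := by
        have h0 : (arr.set idx 0)[idx]'(by simpa using hik) = 0 := List.getElem_set_self _
        have hm := List.getElem_mem (l := arr.set idx 0) (by simpa using hik)
        rwa [h0] at hm
      have h0le : (0 : Int) ≤ m := hmaxm 0 h0mem
      rcases List.mem_or_eq_of_mem_set hmem with hmem' | he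
      · exact absurd (hneg m hmem') (by omega)
      · rw [he]
  have halt : solution_alt arr = (List.range arr.length).map (fun _ => (0 : Int)) := by
    rw [alt_eq]
    apply List.map_congr_left
    intro j hj
    simp only [List.mem_range] at hj
    have hm : arr.getD j 0 ∈ arr := by
      rw [List.getD_eq_getElem?_getD, List.getElem?_eq_getElem hj]
      exact List.getElem_mem hj
    rw [if_pos (by have := hneg _ hm; omega)]
  intro heq
  have e1 : (solution arr)[idx]? = some 1 := by
    rw [hsol, List.getElem?_set_self (by simpa using hik)]
  have e2 : (solution_alt arr)[idx]? = some 0 := by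
    rw [halt, List.getElem?_map, List.getElem?_range hik]
    rfl
  rw [heq, e2] at e1
  simp at e1
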